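-- pv_equiv track=rewrite | github.com/lkiwan/tradesense | backend/services/yfinance_service.py | _extract_span_values
-- ===== SOURCE A (Python) =====
-- def _extract_span_values(html_row):
--     """Extract values from <span dir="ltr">VALUE</span> tags without regex (eventlet-safe)"""
--     values = []
--     search_str = '<span dir="ltr">'
--     end_str = '</span>'
--     pos = 0
--     while True:
--         start = html_row.find(search_str, pos)
--         if start == -1:
--             break
--         start += len(search_str)
--         end = html_row.find(end_str, start)
--         if end == -1:
--             break
--         values.append(html_row[start:end])
--         pos = end + len(end_str)
--     return values
-- ===== SOURCE B (Python) =====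
-- def _extract_span_values(html_row):
--     """Extract values via str.partition on a shrinking remainder (no index bookkeeping)."""
--     values = []
--     rest = html_row
--     while True:
--         _, sep, after = rest.partition('<span dir="ltr">')
--         if not sep:
--             return values
--         val, sep, rest = after.partition('</span>')
--         if not sep:
--             return values
--         values.append(val)
-- ===== Notes on version B (the rewrite author's own statement) =====
-- stated objective: alternative
-- what changed: Replaces the index-tracking find-loop over the fixed string (pos, start, end arithmetic and explicit slicing) with str.partition applied to a shrinking remainder, so no positions are maintained at all.
import Mathlib
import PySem

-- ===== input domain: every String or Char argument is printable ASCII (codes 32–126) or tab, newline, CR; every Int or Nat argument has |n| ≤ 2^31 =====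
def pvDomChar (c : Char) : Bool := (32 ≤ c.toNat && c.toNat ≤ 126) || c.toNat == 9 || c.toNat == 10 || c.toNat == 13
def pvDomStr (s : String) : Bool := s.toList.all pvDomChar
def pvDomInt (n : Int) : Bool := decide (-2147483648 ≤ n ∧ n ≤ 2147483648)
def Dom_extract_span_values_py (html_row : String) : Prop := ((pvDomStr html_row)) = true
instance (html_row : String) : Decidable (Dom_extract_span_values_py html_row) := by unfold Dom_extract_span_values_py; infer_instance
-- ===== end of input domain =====

-- B replaces A's index-tracking find-loop by str.partition on a shrinking remainder (alternative decomposition, same cost); equivalence proved on all inputs.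


-- ===== PORT A =====
-- search_str = '<span dir="ltr">' (16 chars), end_str = '</span>' (7 chars)
def pvStartTag : List Char := "<span dir=\"ltr\">".toList
def pvEndTag : List Char := "</span>".toList

-- termination helper for the port of A's `while True` loop: once the loop runs past the
-- string, `find` from there is -1 (cited by decreasing_by below)
theorem pvFindFrom_ge (cs sub : List Char) (k : Nat) (hk : cs.length ≤ k) (hsub : sub ≠ []) :
    PySem.Chars.findFrom cs sub (k : Int) none = -1 := by
  unfold PySem.Chars.findFrom
  have h1 : ¬ ((k : Int) < 0) := by omega
  by_cases hlt : (cs.length : Int) < (k : Int)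
  · simp [h1, hlt]
  · have hdrop : List.drop k cs = [] := by
      simp [List.drop_eq_nil_iff]; omega
    have hfind : PySem.Chars.find (List.drop k cs) sub = -1 := by
      rw [hdrop, PySem.Chars.find_eq_neg_one_iff]
      intro h
      exact hsub (List.eq_nil_of_infix_nil h)
    simp [h1, hlt, hfind]

theorem pvALoop_step (cs : List Char) (pos : Nat)
    (hs : ¬ PySem.Chars.findFrom cs pvStartTag (pos : Int) none = -1)
    (he : ¬ PySem.Chars.findFrom cs pvEndTag
        (PySem.Chars.findFrom cs pvStartTag (pos : Int) none + 16) none = -1) :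
    pos < (PySem.Chars.findFrom cs pvEndTag
        (PySem.Chars.findFrom cs pvStartTag (pos : Int) none + 16) none).toNat + 7 ∧
    (PySem.Chars.findFrom cs pvEndTag
        (PySem.Chars.findFrom cs pvStartTag (pos : Int) none + 16) none).toNat + 7 ≤ cs.length := by
  have hpos : pos ≤ cs.length := by
    by_contra hgt
    exact hs (pvFindFrom_ge cs pvStartTag pos (by omega) (by decide))
  obtain ⟨h1, h2, -⟩ := PySem.Chars.findFrom_natCast_spec cs pvStartTag pos hpos hs
  set a := PySem.Chars.findFrom cs pvStartTag (pos : Int) none with ha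
  have ha0 : 0 ≤ a := le_trans (by exact_mod_cast Nat.zero_le pos) h1
  have hlen16 : a.toNat + 16 ≤ cs.length := by
    have := h2.length_le
    simp [pvStartTag] at this
    omega
  have hcast : a + 16 = ((a.toNat + 16 : Nat) : Int) := by omega
  rw [hcast] at he ⊢
  obtain ⟨h3, h4, -⟩ := PySem.Chars.findFrom_natCast_spec cs pvEndTag (a.toNat + 16) hlen16 he
  set e := PySem.Chars.findFrom cs pvEndTag ((a.toNat + 16 : Nat) : Int) none with hee
  have hlen7 : e.toNat + 7 ≤ cs.length := by
    have := h4.length_le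
    simp [pvEndTag] at this
    omega
  constructor
  · omega
  · exact hlen7

-- literal port of A: `pos` starts at 0; each pass finds '<span dir="ltr">' from pos,
-- then '</span>' after it, appends the slice and moves pos past the end tag
def pvALoop (cs : List Char) (pos : Nat) (values : List String) : List String :=
  if hs : PySem.Chars.findFrom cs pvStartTag (pos : Int) none = -1 then values
  else
    if he : PySem.Chars.findFrom cs pvEndTag
        (PySem.Chars.findFrom cs pvStartTag (pos : Int) none + 16) none = -1 then values
    else
      pvALoop cs
        ((PySem.Chars.findFrom cs pvEndTag
            (PySem.Chars.findFrom cs pvStartTag (pos : Int) none + 16) none).toNat + 7)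
        (values ++ [String.ofList (PySem.List.slice cs
            (some (PySem.Chars.findFrom cs pvStartTag (pos : Int) none + 16))
            (some (PySem.Chars.findFrom cs pvEndTag
                (PySem.Chars.findFrom cs pvStartTag (pos : Int) none + 16) none)))])
termination_by cs.length + 1 - pos
decreasing_by
  have h := pvALoop_step cs pos hs he
  omega

def extract_span_values_py (html_row : String) : List String :=
  pvALoop html_row.toList 0 []

-- ===== PORT B =====
-- exact port of str.partition for a nonempty separator: the middle component is the
-- truthiness of the returned separator piece (found / not found), which is all Source B tests
def pvPartition (s sub : List Char) : List Char × Bool × List Char :=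
  if PySem.Chars.find s sub = -1 then (s, false, [])
  else (s.take (PySem.Chars.find s sub).toNat, true,
        s.drop ((PySem.Chars.find s sub).toNat + sub.length))

-- termination helper for B's loop on the shrinking remainder (cited by decreasing_by below)
theorem pvPartition_found_len (s sub : List Char) (h : (pvPartition s sub).2.1 = true) :
    (pvPartition s sub).2.2.length + sub.length ≤ s.length := by
  unfold pvPartition
  split_ifs with hf
  · unfold pvPartition at h
    simp [hf] at h
  · have h0 : 0 ≤ PySem.Chars.find s sub := by
      have := PySem.Chars.neg_one_le_find s sub
      omega
    obtain ⟨hp, -⟩ := PySem.Chars.find_spec h0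
    have hle := hp.length_le
    simp only [List.length_drop] at hle
    simp only [List.length_drop]
    omega

-- literal port of Source B: partition off the next start tag, then the next end tag,
-- keep the middle piece and loop on the remainder
def pvAltGo (rest : List Char) (values : List String) : List String :=
  if h1 : (pvPartition rest pvStartTag).2.1 = false then values
  else
    if h2 : (pvPartition (pvPartition rest pvStartTag).2.2 pvEndTag).2.1 = false then values
    else
      pvAltGo (pvPartition (pvPartition rest pvStartTag).2.2 pvEndTag).2.2
        (values ++ [String.ofList (pvPartition (pvPartition rest pvStartTag).2.2 pvEndTag).1])
termination_by rest.length
decreasing_by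
  have e1 : (pvPartition rest pvStartTag).2.1 = true := by
    cases hx : (pvPartition rest pvStartTag).2.1
    · exact absurd hx h1
    · rfl
  have e2 : (pvPartition (pvPartition rest pvStartTag).2.2 pvEndTag).2.1 = true := by
    cases hx : (pvPartition (pvPartition rest pvStartTag).2.2 pvEndTag).2.1
    · exact absurd hx h2
    · rfl
  have r1 := pvPartition_found_len rest pvStartTag e1
  have r2 := pvPartition_found_len (pvPartition rest pvStartTag).2.2 pvEndTag e2
  have l1 : pvStartTag.length = 16 := by decide
  have l2 : pvEndTag.length = 7 := by decide
  omega

def extract_span_values_py_alt (html_row : String) : List String :=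
  pvAltGo html_row.toList []

-- ===== PRECONDITION & SPEC =====
def Spec_extract_span_values_py (html_row : String) (out : List String) : Prop := out = extract_span_values_py_alt html_row
instance (html_row : String) (out : List String) : Decidable (Spec_extract_span_values_py html_row out) := by unfold Spec_extract_span_values_py; infer_instance

-- ===== CLAIM (what is proved, stated in full; the proofs are below) =====
def Claim_equal_extract_span_values_py : Prop := ∀ (html_row : String), Dom_extract_span_values_py html_row → Spec_extract_span_values_py html_row (extract_span_values_py html_row)

-- ===== LEMMAS AND PROOFS =====

theorem pvMain (cs : List Char) (k : Nat) : ∀ (pos : Nat) (values : List String),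
    cs.length - pos ≤ k → pos ≤ cs.length →
    pvALoop cs pos values = pvAltGo (cs.drop pos) values := by
  induction k with
  | zero =>
    intro pos values hfuel hpos
    have hpe : cs.length ≤ pos := by omega
    have hA : PySem.Chars.findFrom cs pvStartTag (pos : Int) none = -1 :=
      pvFindFrom_ge cs pvStartTag pos hpe (by decide)
    have hdrop : cs.drop pos = [] := by
      simp [List.drop_eq_nil_iff]; omega
    have hB : (pvPartition [] pvStartTag).2.1 = false := by decide
    rw [pvALoop, pvAltGo, hdrop]
    simp [hA, hB]
  | succ k ih =>
    intro pos values hfuel hpos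
    have hA1 := PySem.Chars.findFrom_natCast cs pvStartTag pos hpos
    have hl1 : pvStartTag.length = 16 := by decide
    have hl2 : pvEndTag.length = 7 := by decide
    by_cases hf1 : PySem.Chars.find (cs.drop pos) pvStartTag = -1
    · -- no start tag: both loops stop with `values`
      have hA : PySem.Chars.findFrom cs pvStartTag (pos : Int) none = -1 := by
        rw [hA1]; simp [hf1]
      have hB : (pvPartition (cs.drop pos) pvStartTag).2.1 = false := by
        unfold pvPartition; simp [hf1]
      rw [pvALoop, pvAltGo]
      simp [hA, hB]
    · -- start tag found at offset n of the remainder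
      have hf0 : 0 ≤ PySem.Chars.find (cs.drop pos) pvStartTag := by
        have := PySem.Chars.neg_one_le_find (cs.drop pos) pvStartTag
        omega
      obtain ⟨hpre, -⟩ := PySem.Chars.find_spec hf0
      have hfn : PySem.Chars.find (cs.drop pos) pvStartTag =
          ((PySem.Chars.find (cs.drop pos) pvStartTag).toNat : Int) := by omega
      generalize hn : (PySem.Chars.find (cs.drop pos) pvStartTag).toNat = n at hfn hpre
      have hle1 := hpre.length_le
      rw [hl1] at hle1
      simp only [List.length_drop] at hle1
      have hs2 : pos + n + 16 ≤ cs.length := by omega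
      have hA : PySem.Chars.findFrom cs pvStartTag (pos : Int) none = (pos : Int) + n := by
        rw [hA1, if_neg hf1, hfn]
      have hAns : ¬ PySem.Chars.findFrom cs pvStartTag (pos : Int) none = -1 := by
        rw [hA]; omega
      have hcast : ((pos : Int) + n + 16) = ((pos + n + 16 : Nat) : Int) := by push_cast; ring
      have hA2 := PySem.Chars.findFrom_natCast cs pvEndTag (pos + n + 16) hs2
      have hdd : List.drop (n + 16) (List.drop pos cs) = List.drop (pos + n + 16) cs := by
        rw [List.drop_drop]; congr 1
      have hBa : pvPartition (cs.drop pos) pvStartTag =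
          ((cs.drop pos).take n, true, cs.drop (pos + n + 16)) := by
        unfold pvPartition
        rw [if_neg hf1, hfn, hl1]
        simp only [Int.toNat_natCast]
        rw [hdd]
      by_cases hg1 : PySem.Chars.find (cs.drop (pos + n + 16)) pvEndTag = -1
      · -- no closing tag after it: both loops stop with `values`
        have hAe : PySem.Chars.findFrom cs pvEndTag
            (PySem.Chars.findFrom cs pvStartTag (pos : Int) none + 16) none = -1 := by
          rw [hA, hcast, hA2, if_pos hg1]
        have hBe : (pvPartition (cs.drop (pos + n + 16)) pvEndTag).2.1 = false := by
          unfold pvPartition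
          rw [if_pos hg1]
        rw [pvALoop, pvAltGo]
        rw [dif_neg hAns, dif_pos hAe]
        rw [dif_neg (show ¬ (pvPartition (cs.drop pos) pvStartTag).2.1 = false by rw [hBa]; simp)]
        rw [hBa]
        rw [dif_pos hBe]
      · -- closing tag found at offset m of the rest: one value extracted, loop again
        have hg0 : 0 ≤ PySem.Chars.find (cs.drop (pos + n + 16)) pvEndTag := by
          have := PySem.Chars.neg_one_le_find (cs.drop (pos + n + 16)) pvEndTag
          omega
        obtain ⟨hpre2, -⟩ := PySem.Chars.find_spec hg0
        have hgm : PySem.Chars.find (cs.drop (pos + n + 16)) pvEndTag =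
            ((PySem.Chars.find (cs.drop (pos + n + 16)) pvEndTag).toNat : Int) := by omega
        generalize hm : (PySem.Chars.find (cs.drop (pos + n + 16)) pvEndTag).toNat = m at hgm hpre2
        have hle2 := hpre2.length_le
        rw [hl2] at hle2
        simp only [List.length_drop] at hle2
        have h7 : pos + n + 16 + m + 7 ≤ cs.length := by omega
        have hAe : PySem.Chars.findFrom cs pvEndTag
            (PySem.Chars.findFrom cs pvStartTag (pos : Int) none + 16) none =
            ((pos + n + 16 + m : Nat) : Int) := by
          rw [hA, hcast, hA2, if_neg (by rw [hgm]; omega), hgm]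
          push_cast; ring
        have hAne : ¬ PySem.Chars.findFrom cs pvEndTag
            (PySem.Chars.findFrom cs pvStartTag (pos : Int) none + 16) none = -1 := by
          rw [hAe]; omega
        have hdd2 : List.drop (m + 7) (List.drop (pos + n + 16) cs) =
            List.drop (pos + n + 16 + m + 7) cs := by
          rw [List.drop_drop]; congr 1
        have hBb : pvPartition (cs.drop (pos + n + 16)) pvEndTag =
            ((cs.drop (pos + n + 16)).take m, true, cs.drop (pos + n + 16 + m + 7)) := by
          unfold pvPartition
          rw [if_neg hg1, hgm, hl2]
          simp only [Int.toNat_natCast]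
          rw [hdd2]
        rw [pvALoop, pvAltGo]
        rw [dif_neg hAns, dif_neg hAne, hAe, hA, hcast]
        rw [PySem.List.slice_natCast]
        rw [show pos + n + 16 + m - (pos + n + 16) = m by omega]
        rw [Int.toNat_natCast]
        rw [dif_neg (show ¬ (pvPartition (cs.drop pos) pvStartTag).2.1 = false by rw [hBa]; simp)]
        rw [hBa]
        rw [dif_neg (show ¬ (pvPartition (cs.drop (pos + n + 16)) pvEndTag).2.1 = false by rw [hBb]; simp)]
        rw [hBb]
        exact ih (pos + n + 16 + m + 7)
          (values ++ [String.ofList (List.take m (cs.drop (pos + n + 16)))])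
          (by omega) (by omega)

-- ===== VERDICT (by name: the statement is the Claim_ definition above) =====
theorem extract_span_values_py_spec : Claim_equal_extract_span_values_py := by
  intro s _
  unfold Spec_extract_span_values_py extract_span_values_py extract_span_values_py_alt
  have := pvMain s.toList s.toList.length 0 [] (by omega) (by omega)
  simpa using this
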